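-- pv_equiv track=rewrite | github.com/elektrobohemian/StabiHacks | pica_plus/processPicaPlus.py | handle028a
-- ===== SOURCE A (Python) =====
-- def handle028a(tokens):
--     """
--     Processes the 028A (1. Verfasser) field. Currently, only subfield a and d are supported.
--     For details (in German), see: https://www.gbv.de/bibliotheken/verbundbibliotheken/02Verbund/01Erschliessung/02Richtlinien/01KatRicht/3000.pdf
--     :param tokens: a list of tokens of the field 028A
--     :return: a tuple in form of (<family name, first name>,<gnd id, if available>)
--     """
--     familyName=""
--     firstName=""
--     gnd=""
--     for token in tokens:
--         if token.startswith("a"):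
--             familyName=token[1:].strip()+", "
--         elif token.startswith("d"):
--             firstName=token[1:].strip()
--         # GND id
--         elif token.startswith("0"):
--             gnd=token[1:].strip()
--
--     return((familyName+firstName,gnd))
-- ===== SOURCE B (Python) =====
-- def handle028a(tokens):
--     def last_match(prefix):
--         # scan from the back, stop at the first match
--         for t in reversed(tokens):
--             if t.startswith(prefix):
--                 return t[1:].strip()
--         return None
--     a = last_match("a")
--     d = last_match("d")
--     g = last_match("0")
--     familyName = a + ", " if a is not None else ""
--     firstName = d if d is not None else ""
--     gnd = g if g is not None else ""
--     return (familyName + firstName, gnd)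
-- ===== Notes on version B (the rewrite author's own statement) =====
-- stated objective: alternative
-- what changed: Replaces A's forward stateful overwrite loop with per-subfield backward scans that early-exit at the first match from the end, carrying no mutable state.
import Mathlib
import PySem

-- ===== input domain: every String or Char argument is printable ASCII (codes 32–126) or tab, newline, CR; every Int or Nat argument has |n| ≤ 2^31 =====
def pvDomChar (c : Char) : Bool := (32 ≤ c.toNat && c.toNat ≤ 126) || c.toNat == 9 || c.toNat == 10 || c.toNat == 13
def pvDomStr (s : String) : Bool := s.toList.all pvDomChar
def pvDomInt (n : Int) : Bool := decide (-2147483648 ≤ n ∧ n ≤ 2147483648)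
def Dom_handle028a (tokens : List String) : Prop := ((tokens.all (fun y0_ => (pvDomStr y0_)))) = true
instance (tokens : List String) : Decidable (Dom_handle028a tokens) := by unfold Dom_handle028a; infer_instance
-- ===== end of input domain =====

-- B replaces A's forward stateful overwrite loop with per-subfield backward scans that early-exit at the first match from the end.

-- ===== PORT A =====
-- the value stored for a matching token: token[1:].strip()
def pvVal (token : String) : String :=
  PySem.Str.strip (PySem.Str.slice token (some 1) none)

def pvStepA (s : String × String × String) (token : String) : String × String × String :=
  if PySem.Str.startswith token "a" then (pvVal token ++ ", ", s.2.1, s.2.2)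
  else if PySem.Str.startswith token "d" then (s.1, pvVal token, s.2.2)
  else if PySem.Str.startswith token "0" then (s.1, s.2.1, pvVal token)
  else s

def handle028a (tokens : List String) : String × String :=
  let st := tokens.foldl pvStepA ("", "", "")
  (st.1 ++ st.2.1, st.2.2)

-- ===== PORT B =====
-- Source B's last_match: walk the reversed list, return at the first token with the prefix
def pvLastMatch (tokens : List String) (p : String) : Option String :=
  match tokens.reverse.find? (fun t => PySem.Str.startswith t p) with
  | some t => some (pvVal t)
  | none => none

def handle028a_alt (tokens : List String) : String × String :=
  let a := pvLastMatch tokens "a"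
  let d := pvLastMatch tokens "d"
  let g := pvLastMatch tokens "0"
  let familyName := match a with | some v => v ++ ", " | none => ""
  let firstName := match d with | some v => v | none => ""
  let gnd := match g with | some v => v | none => ""
  (familyName ++ firstName, gnd)

-- ===== PRECONDITION & SPEC =====
def Spec_handle028a (tokens : List String) (out : String × String) : Prop := out = handle028a_alt tokens
instance (tokens : List String) (out : String × String) : Decidable (Spec_handle028a tokens out) := by unfold Spec_handle028a; infer_instance

-- ===== CLAIM (what is proved, stated in full; the proofs are below) =====
def Claim_equal_handle028a : Prop := ∀ (tokens : List String), Dom_handle028a tokens → Spec_handle028a tokens (handle028a tokens)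

-- ===== LEMMAS AND PROOFS =====

-- a list of chars cannot start with two different characters
theorem pvStartswith_excl (cs : List Char) (c₁ c₂ : Char) (hne : c₁ ≠ c₂)
    (h₁ : PySem.Chars.startswith cs [c₁] = true)
    (h₂ : PySem.Chars.startswith cs [c₂] = true) : False := by
  rw [PySem.Chars.startswith_iff] at h₁ h₂
  rcases h₁ with ⟨u, hu⟩
  rcases h₂ with ⟨v, hv⟩
  rw [← hu] at hv
  simp at hv
  exact hne hv.1.symm

-- loop invariant: each component of A's foldl state is the first match from the back (or the seed)
theorem pvFoldl_eq (tokens : List String) (s : String × String × String) :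
    tokens.foldl pvStepA s =
      ( (match tokens.reverse.find? (fun t => PySem.Str.startswith t "a") with
          | some t => pvVal t ++ ", " | none => s.1),
        (match tokens.reverse.find? (fun t => PySem.Str.startswith t "d") with
          | some t => pvVal t | none => s.2.1),
        (match tokens.reverse.find? (fun t => PySem.Str.startswith t "0") with
          | some t => pvVal t | none => s.2.2) ) := by
  induction tokens using List.reverseRecOn with
  | nil => simp
  | append_singleton rest tok ih =>
    by_cases ha : PySem.Chars.startswith tok.toList ['a'] = true
    · have hd : ¬ PySem.Chars.startswith tok.toList ['d'] = true := fun h =>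
        pvStartswith_excl tok.toList 'a' 'd' (by decide) ha h
      have hg : ¬ PySem.Chars.startswith tok.toList ['0'] = true := fun h =>
        pvStartswith_excl tok.toList 'a' '0' (by decide) ha h
      simp [List.foldl_append, ih, pvStepA, PySem.Str.startswith, ha, hd, hg]
    · by_cases hd : PySem.Chars.startswith tok.toList ['d'] = true
      · have hg : ¬ PySem.Chars.startswith tok.toList ['0'] = true := fun h =>
          pvStartswith_excl tok.toList 'd' '0' (by decide) hd h
        simp [List.foldl_append, ih, pvStepA, PySem.Str.startswith, ha, hd, hg]
      · by_cases hg : PySem.Chars.startswith tok.toList ['0'] = true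
        · simp [List.foldl_append, ih, pvStepA, PySem.Str.startswith, ha, hd, hg]
        · simp [List.foldl_append, ih, pvStepA, PySem.Str.startswith, ha, hd, hg]

-- ===== VERDICT (by name: the statement is the Claim_ definition above) =====
theorem handle028a_spec : Claim_equal_handle028a := by
  intro tokens _
  unfold Spec_handle028a handle028a handle028a_alt pvLastMatch
  rw [pvFoldl_eq]
  cases tokens.reverse.find? (fun t => PySem.Str.startswith t "a") <;>
  cases tokens.reverse.find? (fun t => PySem.Str.startswith t "d") <;>
  cases tokens.reverse.find? (fun t => PySem.Str.startswith t "0") <;> simp
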